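-- pv_equiv track=rewrite | github.com/seiichikick0404/coding-problems | practice/C - City Savers.py | solve
-- ===== SOURCE A (Python) =====
-- def solve(n, a, b):
--     ans = 0
--     for i in range(n):
--         # 勇者iが倒せる数が残っていないときは次の勇者へ
--         if b[i] == 0:
--             continue
--
--         # 勇者iが倒せる数が残っているモンスターの数より少ないときは倒せるだけ倒す
--         # 都市iのモンスターを倒しきれないとき
--         if b[i] <= a[i]:
--             ans += b[i]
--             a[i] -= b[i]  # 実際にモンスターを倒した分を減算
--             continue
--
--         # 都市iのモンスターは倒せるが都市i+1のモンスターは倒しきれないとき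
--         if b[i] <= a[i] + a[i+1]:
--             ans += b[i]
--             b[i] -= a[i]
--             a[i+1] -= b[i]
--             continue
--
--         # 勇者iが都市i, i+1のモンスターをすべて倒しきれるときはすべて倒す
--         ans += a[i] + a[i+1]
--         a[i+1] = 0  # 都市i+1のモンスターをすべて倒したことにする
--
--     return ans
-- ===== SOURCE B (Python) =====
-- def solve(n, a, b):
--     # Complementary counting: answer = (all monsters in cities 0..n) - (survivors).
--     # Survivors are tracked with a carry s = monsters still alive in the current
--     # city when its hero acts; nothing is counted per defeat and nothing is mutated.
--     if n <= 0:
--         return 0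
--     total = sum(a[i] for i in range(n + 1))
--     survivors = 0
--     s = a[0]
--     for i in range(n):
--         if b[i] == 0 or b[i] <= s:
--             survivors += s - b[i]   # hero i never reaches city i+1
--             s = a[i + 1]
--         else:
--             s = max(s + a[i + 1] - b[i], 0)  # leftover of city i+1, clamped
--     survivors += s
--     return total - survivors
-- ===== Notes on version B (the rewrite author's own statement) =====
-- stated objective: alternative
-- what changed: Replaces A's per-hero defeat accounting (three branches mutating both lists) with complementary counting: sum all monsters in cities 0..n, run one non-mutating carry pass that counts only SURVIVORS, and return total minus survivors.
-- outside the precondition, e.g. on solve(1, [5], [3]): A returns 3, B raises IndexError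
import Mathlib
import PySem

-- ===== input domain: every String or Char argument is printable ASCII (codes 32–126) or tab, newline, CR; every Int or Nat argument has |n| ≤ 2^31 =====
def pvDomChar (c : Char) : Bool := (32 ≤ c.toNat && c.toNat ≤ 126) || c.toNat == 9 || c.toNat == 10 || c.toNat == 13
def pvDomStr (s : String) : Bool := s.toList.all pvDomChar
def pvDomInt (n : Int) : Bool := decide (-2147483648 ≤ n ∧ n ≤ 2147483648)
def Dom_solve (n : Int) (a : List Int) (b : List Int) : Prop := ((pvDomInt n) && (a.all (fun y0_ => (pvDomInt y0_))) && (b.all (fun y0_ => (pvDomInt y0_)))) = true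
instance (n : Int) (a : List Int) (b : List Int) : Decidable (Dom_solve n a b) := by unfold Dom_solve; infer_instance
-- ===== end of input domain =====

-- B replaces A's per-hero defeat accounting by complementary counting: total monsters in
-- cities 0..n minus the survivors, tracked by one non-mutating carry pass
-- (objective: alternative). A mutates the lists a and b in place, B mutates nothing;
-- only the RETURN value is claimed equivalent.

-- ===== PORT A =====
-- state = (ans, a, b); one iteration of A's loop body, branches in A's order
def stepA (s : Int × List Int × List Int) (i : Int) : Int × List Int × List Int :=
  let ans := s.1; let a := s.2.1; let b := s.2.2
  let bi := PySem.List.pyGetD b i 0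
  if bi = 0 then s
  else
    let ai := PySem.List.pyGetD a i 0
    if bi ≤ ai then (ans + bi, PySem.List.pySetD a i (ai - bi), b)
    else
      let ai1 := PySem.List.pyGetD a (i + 1) 0
      if bi ≤ ai + ai1 then
        -- ans += b[i]; b[i] -= a[i]; a[i+1] -= b[i]
        let bi' := bi - ai
        (ans + bi, PySem.List.pySetD a (i + 1) (ai1 - bi'), PySem.List.pySetD b i bi')
      else (ans + ai + ai1, PySem.List.pySetD a (i + 1) 0, b)

def solve (n : Int) (a : List Int) (b : List Int) : Int :=
  ((PySem.List.pyRange 0 n 1).foldl stepA (0, a, b)).1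

-- ===== PORT B =====
-- state = (survivors, s); s = monsters still alive in the current city when its hero acts
def stepB (a b : List Int) (st : Int × Int) (i : Int) : Int × Int :=
  let bi := PySem.List.pyGetD b i 0
  let ai1 := PySem.List.pyGetD a (i + 1) 0
  if bi = 0 ∨ bi ≤ st.2 then (st.1 + (st.2 - bi), ai1)
  else (st.1, max (st.2 + ai1 - bi) 0)

def solve_alt (n : Int) (a : List Int) (b : List Int) : Int :=
  if n ≤ 0 then 0
  else
    let total := (PySem.List.pyRange 0 (n + 1) 1).foldl (fun acc i => acc + PySem.List.pyGetD a i 0) 0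
    let fin := (PySem.List.pyRange 0 n 1).foldl (stepB a b) (0, PySem.List.pyGetD a 0 0)
    total - (fin.1 + fin.2)

-- ===== PRECONDITION & SPEC =====
-- Pre_ excludes short lists: B always reads b[0..n-1] and a[0..n], so it raises
-- IndexError there, while A raises on most of them but still returns when its
-- a[i+1] branch happens never to be reached.
def Pre_solve (n : Int) (a : List Int) (b : List Int) : Prop :=
  0 < n → (n ≤ (b.length : Int) ∧ n + 1 ≤ (a.length : Int))
instance (n : Int) (a : List Int) (b : List Int) : Decidable (Pre_solve n a b) := by
  unfold Pre_solve; infer_instance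

def pvWitness_solve : Int × List Int × List Int := (2, [1, 2, 3], [2, 3])

def Spec_solve (n : Int) (a : List Int) (b : List Int) (out : Int) : Prop := out = solve_alt n a b
instance (n : Int) (a : List Int) (b : List Int) (out : Int) : Decidable (Spec_solve n a b out) := by
  unfold Spec_solve; infer_instance

-- ===== CLAIM (what is proved, stated in full; the proofs are below) =====
def Claim_equal_solve : Prop := ∀ (n : Int) (a : List Int) (b : List Int), Dom_solve n a b → Pre_solve n a b → Spec_solve n a b (solve n a b)

-- ===== LEMMAS AND PROOFS =====

lemma getD_set_int (xs : List Int) (i j : Nat) (v d : Int) :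
    (xs.set i v).getD j d = if i = j ∧ i < xs.length then v else xs.getD j d := by
  rcases Nat.lt_or_ge j xs.length with hj | hj
  · simp [List.getD, hj]
    split_ifs with h1 <;> simp_all
  · rw [List.getD_eq_default, List.getD_eq_default] <;> simp_all

-- prefix sum of a over indices 0..m
def Pref (a : List Int) (m : Nat) : Int :=
  (List.range (m + 1)).foldl (fun acc i => acc + a.getD i 0) 0

lemma Pref_succ (a : List Int) (m : Nat) :
    Pref a (m + 1) = Pref a m + a.getD (m + 1) 0 := by
  unfold Pref
  rw [List.range_succ, List.foldl_append]
  simp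

-- coupling invariant after m iterations: A's answer is the prefix total minus B's
-- survivors-so-far minus B's carry; A's a holds the carry at index m and is the
-- original at indices > m; A's b is original at indices ≥ m
def LoopInv (a b : List Int) (m : Nat) (sA : Int × List Int × List Int) (sB : Int × Int) : Prop :=
  sA.1 = Pref a m - sB.1 - sB.2 ∧
  sA.2.1.getD m 0 = sB.2 ∧
  sA.2.1.length = a.length ∧ sA.2.2.length = b.length ∧
  (∀ j, m + 1 ≤ j → sA.2.1.getD j 0 = a.getD j 0) ∧
  (∀ j, m ≤ j → sA.2.2.getD j 0 = b.getD j 0)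

lemma step_inv (a b : List Int) (nn m : Nat) (hm : m < nn) (ha : nn + 1 ≤ a.length)
    (sA : Int × List Int × List Int) (sB : Int × Int)
    (h : LoopInv a b m sA sB) :
    LoopInv a b (m + 1) (stepA sA (m : Int)) (stepB a b sB (m : Int)) := by
  obtain ⟨hans, hcar, hlA, hlB, heq, hbeq⟩ := h
  have hm1 : ((m : Int) + 1) = ((m + 1 : Nat) : Int) := by push_cast; ring
  have hbeqm : sA.2.2.getD m 0 = b.getD m 0 := hbeq m le_rfl
  have haeq1 : sA.2.1.getD (m + 1) 0 = a.getD (m + 1) 0 := heq (m + 1) le_rfl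
  have hP := Pref_succ a m
  have hmlen : m + 1 < sA.2.1.length := by omega
  unfold LoopInv
  simp only [stepA, stepB, hm1, PySem.List.pyGetD_natCast, PySem.List.pySetD_natCast,
    hbeqm, hcar, haeq1]
  by_cases hA1 : b.getD m 0 = 0
  · rw [if_pos hA1, if_pos (Or.inl hA1)]
    exact ⟨by omega, haeq1, hlA, hlB,
      fun j hj => heq j (by omega), fun j hj => hbeq j (by omega)⟩
  · rw [if_neg hA1]
    by_cases hA2 : b.getD m 0 ≤ sB.2
    · rw [if_pos hA2, if_pos (Or.inr hA2)]
      refine ⟨by omega,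
        by rw [getD_set_int]; (try simp only [true_and]); split_ifs <;> omega,
        by simp [hlA], hlB,
        fun j hj => by
          have e1 := heq j (by omega)
          rw [getD_set_int]; (try simp only [true_and]); split_ifs <;> omega,
        fun j hj => hbeq j (by omega)⟩
    · rw [if_neg hA2, if_neg (by tauto : ¬(b.getD m 0 = 0 ∨ b.getD m 0 ≤ sB.2))]
      by_cases hA3 : b.getD m 0 ≤ sB.2 + a.getD (m + 1) 0
      · rw [if_pos hA3]
        refine ⟨by simp only [max_def]; split_ifs <;> omega,
          by rw [getD_set_int]; (try simp only [max_def, true_and]); split_ifs <;> omega,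
          by simp [hlA], by simp [hlB],
          fun j hj => by
            have e1 := heq j (by omega)
            rw [getD_set_int]; (try simp only [true_and]); split_ifs <;> omega,
          fun j hj => by
            have e1 := hbeq j (by omega)
            rw [getD_set_int]; (try simp only [true_and]); split_ifs <;> omega⟩
      · rw [if_neg hA3]
        refine ⟨by simp only [max_def]; split_ifs <;> omega,
          by rw [getD_set_int]; (try simp only [max_def, true_and]); split_ifs <;> omega,
          by simp [hlA], hlB,
          fun j hj => by
            have e1 := heq j (by omega)
            rw [getD_set_int]; (try simp only [true_and]); split_ifs <;> omega,
          fun j hj => hbeq j (by omega)⟩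

lemma loop_inv (a b : List Int) (nn : Nat) (ha : nn + 1 ≤ a.length) :
    ∀ m, m ≤ nn →
      LoopInv a b m (((List.range m).map (fun k => ((k : Nat) : Int))).foldl stepA (0, a, b))
        (((List.range m).map (fun k => ((k : Nat) : Int))).foldl (stepB a b) (0, a.getD 0 0)) := by
  intro m
  induction m with
  | zero =>
    intro _
    exact ⟨by unfold Pref; simp, rfl, rfl, rfl, fun _ _ => rfl, fun _ _ => rfl⟩
  | succ m ih =>
    intro hm
    rw [List.range_succ, List.map_append, List.foldl_append, List.foldl_append]
    simp only [List.map_cons, List.map_nil, List.foldl_cons, List.foldl_nil]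
    exact step_inv a b nn m (by omega) ha _ _ (ih (by omega))

-- B's total equals the prefix sum Pref
lemma total_eq_pref (a : List Int) (nn : Nat) :
    ((List.range (nn + 1)).map (fun k => ((k : Nat) : Int))).foldl
      (fun acc i => acc + PySem.List.pyGetD a i 0) 0 = Pref a nn := by
  unfold Pref
  induction (nn + 1) with
  | zero => simp
  | succ k ih =>
    rw [List.range_succ, List.map_append, List.foldl_append, List.foldl_append]
    simp only [List.map_cons, List.map_nil, List.foldl_cons, List.foldl_nil, ih,
      PySem.List.pyGetD_natCast]

-- ===== VERDICT (by name: the statement is the Claim_ definition above) =====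
theorem solve_spec : Claim_equal_solve := by
  intro n a b _ hpre
  unfold Spec_solve solve solve_alt
  by_cases hn : n ≤ 0
  · rw [PySem.List.pyRange_one_eq_nil hn]; simp [hn]
  · replace hn : 0 < n := by omega
    obtain ⟨hb, ha⟩ := hpre hn
    simp only [if_neg (by omega : ¬ n ≤ 0)]
    have hr : PySem.List.pyRange 0 n 1 = (List.range n.toNat).map (fun k => ((k : Nat) : Int)) := by
      rw [PySem.List.pyRange_one 0 n]; simp
    have hr1 : PySem.List.pyRange 0 (n + 1) 1
        = (List.range (n.toNat + 1)).map (fun k => ((k : Nat) : Int)) := by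
      rw [PySem.List.pyRange_one 0 (n + 1)]
      have h2 : (n + 1).toNat = n.toNat + 1 := by omega
      simp [h2]
    have h0 : PySem.List.pyGetD a (0 : Int) 0 = a.getD 0 0 := by
      have := PySem.List.pyGetD_natCast a 0 0
      simpa using this
    rw [hr, hr1, total_eq_pref a n.toNat, h0]
    obtain ⟨h1, _, _, _, _, _⟩ := loop_inv a b n.toNat (by omega) n.toNat le_rfl
    omega
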